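-- pv_equiv track=rewrite | github.com/msgm68dev/Xebel | files/thesis-codes/code/MyRouting/utils.py | get_pathlets0
-- ===== SOURCE A (Python) =====
-- def get_pathlets0(path):
--     pathlets = {}
--     maxl = len(path)
--     for L in range(1, maxl+1):
--         for i in range(maxl-L+1):
--             sub = tuple(path[i:i+L])
--             pathlets[sub] = 1
--     return pathlets
-- ===== SOURCE B (Python) =====
-- def get_pathlets0(path):
--     pathlets = {}
--     ws = [()] * (len(path) + 1)
--     for L in range(1, len(path) + 1):
--         ws = [w + (x,) for w, x in zip(ws, path[L - 1:])]
--         for w in ws: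
--             pathlets[w] = 1
--     return pathlets
-- ===== Notes on version B (the rewrite author's own statement) =====
-- stated objective: alternative
-- what changed: Instead of re-slicing path[i:i+L] for every (L,i) pair, B maintains the list of current windows across the outer loop and extends each window by one element per round via zip, so no slicing is performed at all.
import Mathlib
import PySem

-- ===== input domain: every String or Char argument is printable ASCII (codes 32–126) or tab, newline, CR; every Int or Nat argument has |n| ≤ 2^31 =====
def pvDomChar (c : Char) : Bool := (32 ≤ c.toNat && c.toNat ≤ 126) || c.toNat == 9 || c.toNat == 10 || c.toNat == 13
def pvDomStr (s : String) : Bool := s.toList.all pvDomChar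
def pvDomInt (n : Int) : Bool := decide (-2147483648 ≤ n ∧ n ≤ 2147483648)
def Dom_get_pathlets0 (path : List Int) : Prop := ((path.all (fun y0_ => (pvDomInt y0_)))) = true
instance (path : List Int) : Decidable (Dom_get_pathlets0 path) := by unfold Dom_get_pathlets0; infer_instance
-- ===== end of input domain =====

-- B maintains the current windows and extends each by one element per outer round (no slicing);
-- objective: alternative (same asymptotic cost, different inner traversal and maintained state).

-- ===== PORT A =====
def get_pathlets0 (path : List Int) : List (List Int × Int) :=
  let maxl : Int := path.length
  ((PySem.List.pyRange 1 (maxl + 1) 1).foldl (fun pathlets L =>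
      (PySem.List.pyRange 0 (maxl - L + 1) 1).foldl (fun pathlets i =>
        pathlets.insert (PySem.List.slice path (some i) (some (i + L))) 1) pathlets)
    (PySem.Dict.empty : PySem.Dict (List Int) Int)).items

-- ===== PORT B =====
def get_pathlets0_alt (path : List Int) : List (List Int × Int) :=
  let n := path.length
  (((PySem.List.pyRange 1 ((n : Int) + 1) 1).foldl
      (fun (st : PySem.Dict (List Int) Int × List (List Int)) L =>
        let ws := ((st.2.zip (PySem.List.slice path (some (L - 1)) none)).map
          (fun p => p.1 ++ [p.2]))
        (ws.foldl (fun pathlets w => pathlets.insert w 1) st.1, ws))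
      ((PySem.Dict.empty : PySem.Dict (List Int) Int), List.replicate (n + 1) [])).1).items

-- ===== PRECONDITION & SPEC =====
def Spec_get_pathlets0 (path : List Int) (out : List (List Int × Int)) : Prop := out = get_pathlets0_alt path
instance (path : List Int) (out : List (List Int × Int)) : Decidable (Spec_get_pathlets0 path out) := by unfold Spec_get_pathlets0; infer_instance

-- ===== CLAIM (what is proved, stated in full; the proofs are below) =====
def Claim_equal_get_pathlets0 : Prop := ∀ (path : List Int), Dom_get_pathlets0 path → Spec_get_pathlets0 path (get_pathlets0 path)

-- ===== LEMMAS AND PROOFS =====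

lemma foldl_insert_map (l : List Int) (f : Int → List Int) (d : PySem.Dict (List Int) Int) :
    l.foldl (fun pathlets i => pathlets.insert (f i) 1) d
      = (l.map f).foldl (fun pathlets w => pathlets.insert w 1) d := by
  induction l generalizing d with
  | nil => rfl
  | cons x xs ih => simp [ih]

-- the windows of length m of path, in start order
def pvWins (path : List Int) (m : Nat) : List (List Int) :=
  (List.range (path.length - m + 1)).map (fun i => (path.drop i).take m)

lemma pvWins_zero (path : List Int) :
    pvWins path 0 = List.replicate (path.length + 1) [] := by
  simp [pvWins, List.map_const']

-- extension step: zipping windows of length m with path.drop m and appending yields windows of length m+1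
lemma pvWins_succ (path : List Int) (m : Nat) (hm : m < path.length) :
    ((pvWins path m).zip (path.drop m)).map (fun p => p.1 ++ [p.2]) = pvWins path (m + 1) := by
  apply List.ext_getElem
  · simp [pvWins]; omega
  · intro i h1 h2
    simp only [pvWins, List.getElem_map, List.getElem_zip, List.getElem_range]
    have hi : i < path.length - m := by
      simp [pvWins] at h1; omega
    have hget : (path.drop m)[i]'(by simp; omega) = path[m + i]'(by omega) := by
      simp [List.getElem_drop]
    rw [hget, List.take_add_one]
    congr 1
    have : (path.drop i)[m]? = some (path[m + i]'(by omega)) := by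
      rw [List.getElem?_drop, show i + m = m + i from Nat.add_comm i m,
        List.getElem?_eq_getElem (by omega)]
    simp [this]

-- A's inner loop at round L = m+1 equals the list of windows of length m+1
lemma slices_eq (path : List Int) (m : Nat) (hm : m < path.length) :
    (PySem.List.pyRange 0 ((path.length : Int) - ((m : Int) + 1) + 1) 1).map
        (fun i => PySem.List.slice path (some i) (some (i + ((m : Int) + 1))))
      = pvWins path (m + 1) := by
  have h1 : (path.length : Int) - ((m : Int) + 1) + 1 = ((path.length - m : Nat) : Int) := by
    omega
  rw [h1, PySem.List.pyRange_one]
  simp only [List.map_map]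
  have h2 : path.length - (m + 1) + 1 = path.length - m := by omega
  unfold pvWins
  rw [h2]
  have h3 : ((((path.length - m : Nat) : Int) - 0).toNat) = path.length - m := by omega
  rw [h3]
  apply List.map_congr_left
  intro k hk
  simp only [Function.comp_apply, zero_add]
  have h4 : ((k : Int) + ((m : Int) + 1)) = ((k : Int) + ((m + 1 : Nat) : Int)) := by push_cast; ring
  rw [h4, PySem.List.slice_natCast_add]

-- joint loop invariant after m rounds
lemma pvLoop (path : List Int) (m : Nat) (hm : m ≤ path.length) :
    (PySem.List.pyRange 1 ((m : Int) + 1) 1).foldl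
      (fun (st : PySem.Dict (List Int) Int × List (List Int)) L =>
        let ws := ((st.2.zip (PySem.List.slice path (some (L - 1)) none)).map
          (fun p => p.1 ++ [p.2]))
        (ws.foldl (fun pathlets w => pathlets.insert w 1) st.1, ws))
      ((PySem.Dict.empty : PySem.Dict (List Int) Int), List.replicate (path.length + 1) [])
    = ((PySem.List.pyRange 1 ((m : Int) + 1) 1).foldl (fun pathlets L =>
        (PySem.List.pyRange 0 ((path.length : Int) - L + 1) 1).foldl (fun pathlets i =>
          pathlets.insert (PySem.List.slice path (some i) (some (i + L))) 1) pathlets)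
        (PySem.Dict.empty : PySem.Dict (List Int) Int),
       pvWins path m) := by
  induction m with
  | zero =>
      rw [show ((0 : Nat) : Int) + 1 = 1 by norm_num, PySem.List.pyRange_one_eq_nil le_rfl]
      simp [pvWins_zero]
  | succ m ih =>
      have hm' : m ≤ path.length := by omega
      have hlt : m < path.length := by omega
      have hsplit : ((m + 1 : Nat) : Int) + 1 = (((m : Int) + 1) + 1) := by push_cast; ring
      rw [hsplit, PySem.List.pyRange_one_succ_right (by omega), List.foldl_append,
        List.foldl_append, ih hm', List.foldl_cons, List.foldl_nil, List.foldl_cons, List.foldl_nil]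
      have hdrop : PySem.List.slice path (some ((m : Int) + 1 - 1)) none = path.drop m := by
        rw [show ((m : Int) + 1 - 1) = ((m : Nat) : Int) by ring, PySem.List.slice_from_natCast]
      simp only [hdrop, pvWins_succ path m hlt]
      refine Prod.ext ?_ rfl
      simp only []
      rw [foldl_insert_map _ (fun i => PySem.List.slice path (some i) (some (i + ((m : Int) + 1)))),
        slices_eq path m hlt]

-- ===== VERDICT (by name: the statement is the Claim_ definition above) =====
theorem get_pathlets0_spec : Claim_equal_get_pathlets0 := by
  intro path _
  simp only [Spec_get_pathlets0, get_pathlets0, get_pathlets0_alt]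
  rw [pvLoop path path.length le_rfl]
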